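-- pv_equiv track=rewrite | github.com/Alinka8/my-coding-temple-ship-log | python2.py | fill_tank
-- ===== SOURCE A (Python) =====
-- from typing import List
--
-- def fill_tank(tank_size: int, bucket_sizes: List[int]) -> List[int]:
--     bucket_sizes.sort(reverse=True)
--     result = []
--
--     for bucket_size in bucket_sizes:
--         while tank_size >= bucket_size:
--             result.append(bucket_size)
--             tank_size -= bucket_size
--
--     if tank_size == 0:
--         return result
--     else:
--         return None
-- ===== SOURCE B (Python) =====
-- from typing import List
--
-- def fill_tank(tank_size: int, bucket_sizes: List[int]) -> List[int]:
--     bucket_sizes.sort(reverse=True)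
--     result = []
--     for bucket_size in bucket_sizes:
--         if tank_size <= 0:
--             break
--         count = tank_size // bucket_size
--         result += [bucket_size] * count
--         tank_size -= bucket_size * count
--     return result if tank_size == 0 else None
-- ===== Notes on version B (the rewrite author's own statement) =====
-- stated objective: alternative
-- what changed: The inner repeated-subtraction while loop is replaced by one floor division per bucket (count = tank_size // bucket_size, extend by [bucket_size]*count), with an early break once the remaining tank is 0 or negative.
import Mathlib
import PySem

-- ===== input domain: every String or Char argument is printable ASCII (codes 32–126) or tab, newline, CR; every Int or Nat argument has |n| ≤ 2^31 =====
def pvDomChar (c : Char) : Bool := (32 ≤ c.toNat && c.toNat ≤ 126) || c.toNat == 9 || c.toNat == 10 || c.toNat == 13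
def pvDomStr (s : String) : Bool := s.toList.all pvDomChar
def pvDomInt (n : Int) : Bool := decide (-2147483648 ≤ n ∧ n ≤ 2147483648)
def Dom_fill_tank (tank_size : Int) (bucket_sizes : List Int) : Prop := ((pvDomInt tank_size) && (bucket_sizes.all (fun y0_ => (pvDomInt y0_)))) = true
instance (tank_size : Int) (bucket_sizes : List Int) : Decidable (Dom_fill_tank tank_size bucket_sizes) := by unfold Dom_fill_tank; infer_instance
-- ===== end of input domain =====

-- B replaces A's inner repeated-subtraction while loop by one floor division per bucket
-- (count = tank_size // bucket_size) with an early break once the tank is empty; same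
-- in-place descending sort of bucket_sizes as A (return-value equivalence is what is proved).

-- ===== PORT A =====
-- inner 'while tank_size >= bucket_size: result.append(bucket_size); tank_size -= bucket_size';
-- the Nat fuel only makes the loop total: for 0 < b it is never exhausted (fillWhile_drain below);
-- 'result' is kept in reverse (append = cons at the front) and reversed once at the end
def fillWhile : Nat → Int → Int → List Int → Int × List Int
  | 0, t, _, acc => (t, acc)
  | n + 1, t, b, acc => if t ≥ b then fillWhile n (t - b) b (b :: acc) else (t, acc)

def fill_tank (tank_size : Int) (bucket_sizes : List Int) : Option (List Int) :=
  let sorted := PySem.List.sorted bucket_sizes (fun x => x) true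
  let st := sorted.foldl (fun (s : Int × List Int) b => fillWhile (s.1.toNat + 1) s.1 b s.2) (tank_size, [])
  if st.1 = 0 then some st.2.reverse else none

-- ===== PORT B =====
-- 'for bucket_size in …: if tank_size <= 0: break; count = tank_size // bucket_size; …'
def fillDiv : List Int → Int → List Int → Int × List Int
  | [], t, acc => (t, acc)
  | b :: rest, t, acc =>
    if t ≤ 0 then (t, acc)
    else
      let q := PySem.Int.floordiv t b
      fillDiv rest (t - b * q) (acc ++ List.replicate q.toNat b)

def fill_tank_alt (tank_size : Int) (bucket_sizes : List Int) : Option (List Int) :=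
  let sorted := PySem.List.sorted bucket_sizes (fun x => x) true
  let st := fillDiv sorted tank_size []
  if st.1 = 0 then some st.2 else none

-- ===== PRECONDITION & SPEC =====
-- Pre_ is exactly the set of inputs on which A terminates: every bucket is positive or
-- strictly above the tank; otherwise A's while loop runs forever on a bucket ≤ 0.
def Pre_fill_tank (tank_size : Int) (bucket_sizes : List Int) : Prop :=
  ∀ b ∈ bucket_sizes, 0 < b ∨ tank_size < b
instance (tank_size : Int) (bucket_sizes : List Int) : Decidable (Pre_fill_tank tank_size bucket_sizes) := by unfold Pre_fill_tank; infer_instance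

def pvWitness_fill_tank : Int × List Int := (11, [5, 3, 2])

def Spec_fill_tank (tank_size : Int) (bucket_sizes : List Int) (out : Option (List Int)) : Prop := out = fill_tank_alt tank_size bucket_sizes
instance (tank_size : Int) (bucket_sizes : List Int) (out : Option (List Int)) : Decidable (Spec_fill_tank tank_size bucket_sizes out) := by unfold Spec_fill_tank; infer_instance

-- ===== CLAIM (what is proved, stated in full; the proofs are below) =====
def Claim_equal_fill_tank : Prop := ∀ (tank_size : Int) (bucket_sizes : List Int), Dom_fill_tank tank_size bucket_sizes → Pre_fill_tank tank_size bucket_sizes → Spec_fill_tank tank_size bucket_sizes (fill_tank tank_size bucket_sizes)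

-- ===== LEMMAS AND PROOFS =====

-- A's inner while loop, with enough fuel, conses t / b copies of b and leaves t % b
theorem fillWhile_drain (b : Int) (hb : 0 < b) :
    ∀ (n : Nat) (t : Int) (acc : List Int), 0 ≤ t → t < (n : Int) →
      fillWhile n t b acc = (t % b, List.replicate (t / b).toNat b ++ acc) := by
  intro n
  induction n with
  | zero => intro t acc h0 hn; simp at hn; omega
  | succ n ih =>
    intro t acc h0 hn
    by_cases h : t ≥ b
    · rw [fillWhile, if_pos h, ih (t - b) _ (by omega) (by push_cast at hn ⊢; omega)]
      have hdiv : t / b = (t - b) / b + 1 := by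
        have := Int.add_mul_ediv_right (t - b) 1 (by omega : b ≠ 0)
        simp at this; omega
      have hge : 0 ≤ (t - b) / b := Int.ediv_nonneg (by omega) (by omega)
      have hmod : (t - b) % b = t % b := Int.sub_emod_right t b
      rw [hmod, hdiv]
      have : ((t - b) / b + 1).toNat = ((t - b) / b).toNat + 1 := by omega
      rw [this]
      simp [List.replicate_succ']
    · rw [fillWhile, if_neg h]
      rw [Int.emod_eq_of_lt h0 (by omega), Int.ediv_eq_zero_of_lt h0 (by omega)]
      simp

-- when the tank is strictly below every remaining bucket, A's loop body never fires
theorem foldA_skip (l : List Int) (t : Int) (acc : List Int) (h : ∀ b ∈ l, t < b) :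
    l.foldl (fun (s : Int × List Int) b => fillWhile (s.1.toNat + 1) s.1 b s.2) (t, acc)
      = (t, acc) := by
  induction l with
  | nil => rfl
  | cons b rest ih =>
    have hb : t < b := h b (by simp)
    have : fillWhile (t.toNat + 1) t b acc = (t, acc) := by
      rw [fillWhile, if_neg (by omega)]
    rw [List.foldl_cons, this]
    exact ih (fun x hx => h x (by simp [hx]))

-- A's fold (reversed accumulator) and B's recursion agree whenever every bucket is
-- positive or above the tank
theorem loop_eq (l : List Int) :
    ∀ (t : Int) (acc : List Int), (∀ b ∈ l, 0 < b ∨ t < b) →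
      l.foldl (fun (s : Int × List Int) b => fillWhile (s.1.toNat + 1) s.1 b s.2) (t, acc)
        = ((fillDiv l t acc.reverse).1, (fillDiv l t acc.reverse).2.reverse) := by
  induction l with
  | nil => intro t acc _; simp [fillDiv]
  | cons b rest ih =>
    intro t acc hpre
    by_cases ht : t ≤ 0
    · rw [fillDiv, if_pos ht]
      simp only [List.reverse_reverse]
      exact foldA_skip (b :: rest) t acc
        (fun x hx => by rcases hpre x hx with h | h <;> omega)
    · have hb : 0 < b := by rcases hpre b (by simp) with h | h <;> omega
      rw [fillDiv, if_neg ht, List.foldl_cons]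
      have h0 : (0:Int) ≤ t := by omega
      have hlt : t < ((t.toNat + 1 : Nat) : Int) := by omega
      rw [fillWhile_drain b hb (t.toNat + 1) t acc h0 hlt]
      rw [PySem.Int.floordiv_eq_ediv_of_pos hb]
      have hsub : t - b * (t / b) = t % b := by
        rw [Int.emod_def]
      show _ = ((fillDiv rest (t - b * (t / b)) (acc.reverse ++ List.replicate (t / b).toNat b)).1,
                (fillDiv rest (t - b * (t / b)) (acc.reverse ++ List.replicate (t / b).toNat b)).2.reverse)
      rw [hsub]
      have hmodle : t % b ≤ t := by
        have h1 : 0 ≤ t / b := Int.ediv_nonneg h0 hb.le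
        have h2 : 0 ≤ b * (t / b) := mul_nonneg hb.le h1
        omega
      have hrev : (List.replicate (t / b).toNat b ++ acc).reverse
          = acc.reverse ++ List.replicate (t / b).toNat b := by
        simp [List.reverse_replicate]
      rw [← hrev]
      exact ih (t % b) _
        (fun x hx => by rcases hpre x (by simp [hx]) with h | h
                        · exact Or.inl h
                        · exact Or.inr (by omega))

theorem fill_tank_spec : Claim_equal_fill_tank := by
  intro tank_size bucket_sizes _ hpre
  unfold Spec_fill_tank fill_tank fill_tank_alt
  have hpos : ∀ b ∈ PySem.List.sorted bucket_sizes (fun x => x) true, 0 < b ∨ tank_size < b := by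
    intro b hb
    exact hpre b ((PySem.List.mem_sorted _ _ _ _).mp hb)
  have h := loop_eq _ tank_size [] hpos
  simp only [h, List.reverse_nil, List.reverse_reverse]
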